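-- pv_equiv track=rewrite | github.com/Jeff-Lowrey/leet_code | solutions/greedy/python/1221-split-a-string-in-balanced-strings.py | balancedStringSplitWithTracking
-- ===== SOURCE A (Python) =====
-- from typing import Any, List
--
-- def balancedStringSplitWithTracking(s: str) -> tuple[int, List[str]]:
--     """
--     Returns both count and actual substrings (for educational purposes).
--
--     Args:
--         s: Balanced string
--
--     Returns:
--         Tuple of (count, list of balanced substrings)
--     """
--     balance = 0
--     count = 0
--     substrings: list[Any] = []
--     start = 0
--
--     for i, char in enumerate(s):
--         balance += 1 if char == "R" else -1
--
--         if balance == 0: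
--             # Found balanced substring
--             substrings.append(s[start : i + 1])
--             count += 1
--             start = i + 1
--
--     return count, substrings
-- ===== SOURCE B (Python) =====
-- from typing import List
--
-- def balancedStringSplitWithTracking(s: str) -> tuple[int, List[str]]:
--     # Greedy peel: repeatedly cut off the shortest balanced prefix of the
--     # remaining string; stop when none exists.
--     substrings = []
--     rest = s
--     while rest:
--         bal = 0
--         k = None
--         for j, ch in enumerate(rest):
--             bal += 1 if ch == "R" else -1
--             if bal == 0:
--                 k = j + 1
--                 break
--         if k is None:
--             break
--         substrings.append(rest[:k])
--         rest = rest[k:]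
--     return len(substrings), substrings
-- ===== Notes on version B (the rewrite author's own statement) =====
-- stated objective: alternative
-- what changed: A's single stateful scan (balance, count, start, substrings over absolute indices) is replaced by a greedy peel: repeatedly find the shortest balanced prefix of the remaining string, cut it off, and recurse on the suffix; count is the number of pieces peeled.
import Mathlib
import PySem

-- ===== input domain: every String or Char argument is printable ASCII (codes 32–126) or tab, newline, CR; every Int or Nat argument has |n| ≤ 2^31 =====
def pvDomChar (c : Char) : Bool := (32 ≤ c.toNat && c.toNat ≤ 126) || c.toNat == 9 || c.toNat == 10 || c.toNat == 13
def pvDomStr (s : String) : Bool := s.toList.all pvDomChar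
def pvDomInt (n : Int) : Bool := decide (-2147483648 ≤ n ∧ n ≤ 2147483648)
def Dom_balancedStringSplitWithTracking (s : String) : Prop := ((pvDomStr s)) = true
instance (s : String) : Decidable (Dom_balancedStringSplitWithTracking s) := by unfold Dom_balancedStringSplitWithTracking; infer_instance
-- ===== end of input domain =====

-- B replaces A's single stateful scan by a greedy peel: repeatedly cut off the
-- shortest balanced prefix of the remaining string (objective: alternative).

-- ===== PORT A =====
-- the for-loop over enumerate(s): state (balance, count, substrings, start), index i carried structurally
def pvGoA (s : List Char) (cs : List Char) (i bal count : Int)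
    (subs : List String) (start : Int) : Int × List String :=
  match cs with
  | [] => (count, subs)
  | c :: rest =>
    let bal' := bal + (if c = 'R' then 1 else -1)
    if bal' = 0 then
      pvGoA s rest (i + 1) bal' (count + 1)
        (subs ++ [String.ofList (PySem.List.slice s (some start) (some (i + 1)))]) (i + 1)
    else
      pvGoA s rest (i + 1) bal' count subs start

def balancedStringSplitWithTracking (s : String) : Int × List String :=
  pvGoA s.toList s.toList 0 0 0 [] 0

-- ===== PORT B =====
-- the inner for-loop: first index j where the running balance hits 0, as k = j+1 chars
def pvFirstCut (cs : List Char) (bal : Int) : Option Nat :=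
  match cs with
  | [] => none
  | c :: rest =>
    let bal' := bal + (if c = 'R' then 1 else -1)
    if bal' = 0 then some 1 else (pvFirstCut rest bal').map (· + 1)

-- termination fact for the outer while loop (cited by pvPeel's decreasing_by)
theorem pvFirstCut_pos (cs : List Char) (bal : Int) (k : Nat)
    (h : pvFirstCut cs bal = some k) : 1 ≤ k := by
  induction cs generalizing bal k with
  | nil => simp [pvFirstCut] at h
  | cons c rest ih =>
    simp only [pvFirstCut] at h
    split at h <;> split at h
    all_goals first
      | (cases h; omega)
      | (rcases Option.map_eq_some_iff.mp h with ⟨m, _, rfl⟩; omega)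

-- the outer while loop: peel rest[:k], continue on rest[k:]
-- (rest[:k]/rest[k:] with 0 ≤ k are exactly List.take/List.drop)
def pvPeel (rest : List Char) : List String :=
  match h : pvFirstCut rest 0 with
  | none => []
  | some k => String.ofList (rest.take k) :: pvPeel (rest.drop k)
termination_by rest.length
decreasing_by
  have hk := pvFirstCut_pos rest 0 k h
  have : rest ≠ [] := by rintro rfl; simp [pvFirstCut] at h
  have : 0 < rest.length := List.length_pos_iff.mpr this
  simp [List.length_drop]; omega

def balancedStringSplitWithTracking_alt (s : String) : Int × List String :=
  let subs := pvPeel s.toList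
  ((subs.length : Int), subs)

-- ===== PRECONDITION & SPEC =====
def Spec_balancedStringSplitWithTracking (s : String) (out : Int × List String) : Prop := out = balancedStringSplitWithTracking_alt s
instance (s : String) (out : Int × List String) : Decidable (Spec_balancedStringSplitWithTracking s out) := by unfold Spec_balancedStringSplitWithTracking; infer_instance

-- ===== CLAIM =====
def Claim_equal_balancedStringSplitWithTracking : Prop := ∀ (s : String), Dom_balancedStringSplitWithTracking s → Spec_balancedStringSplitWithTracking s (balancedStringSplitWithTracking s)

-- ===== LEMMAS AND PROOFS =====

theorem pvFirstCut_le (cs : List Char) (bal : Int) (k : Nat)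
    (h : pvFirstCut cs bal = some k) : k ≤ cs.length := by
  induction cs generalizing bal k with
  | nil => simp [pvFirstCut] at h
  | cons c rest ih =>
    simp only [pvFirstCut] at h
    simp only [List.length_cons]
    split at h <;> split at h
    all_goals first
      | (cases h; omega)
      | (rcases Option.map_eq_some_iff.mp h with ⟨m, hm, rfl⟩;
         have := ih _ _ hm; omega)

-- one block of A's scan equals: find the first cut, append the slice, restart
theorem pvGoA_block (cs : List Char) (s : List Char) (i bal count : Int)
    (subs : List String) (start : Int) :
    pvGoA s cs i bal count subs start =
      match pvFirstCut cs bal with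
      | none => (count, subs)
      | some k =>
          pvGoA s (cs.drop k) (i + k) 0 (count + 1)
            (subs ++ [String.ofList (PySem.List.slice s (some start) (some (i + k)))]) (i + k)
  := by
  induction cs generalizing i bal with
  | nil => simp [pvGoA, pvFirstCut]
  | cons c rest ih =>
    simp only [pvGoA, pvFirstCut]
    by_cases hb : bal + (if c = 'R' then 1 else -1) = 0
    · simp [hb]
    · rw [if_neg hb, if_neg hb, ih (i + 1) _]
      cases hfc : pvFirstCut rest (bal + (if c = 'R' then 1 else -1)) with
      | none => simp
      | some m =>
        simp only [Option.map_some]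
        have : i + 1 + (m : Int) = i + ((m + 1 : Nat) : Int) := by push_cast; ring
        simp [this]

theorem pvPeel_none (rest : List Char) (h : pvFirstCut rest 0 = none) :
    pvPeel rest = [] := by
  rw [pvPeel]; split <;> simp_all

theorem pvPeel_some (rest : List Char) (k : Nat) (h : pvFirstCut rest 0 = some k) :
    pvPeel rest = String.ofList (rest.take k) :: pvPeel (rest.drop k) := by
  rw [pvPeel]; split <;> simp_all

theorem pvGoA_peel (n : Nat) (cs : List Char) (s : List Char) (count : Int)
    (subs : List String) (hcs : cs = s.drop n) :
    pvGoA s cs (n : Int) 0 count subs (n : Int) =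
      (count + ((pvPeel cs).length : Int), subs ++ pvPeel cs) := by
  induction hL : cs.length using Nat.strong_induction_on generalizing n cs count subs with
  | _ L ih =>
  rw [pvGoA_block]
  cases hfc : pvFirstCut cs 0 with
  | none => rw [pvPeel_none cs hfc]; simp
  | some k =>
    have hk1 := pvFirstCut_pos cs 0 k hfc
    have hk2 := pvFirstCut_le cs 0 k hfc
    have hne : cs ≠ [] := by rintro rfl; simp [pvFirstCut] at hfc
    have hpos : 0 < cs.length := List.length_pos_iff.mpr hne
    rw [pvPeel_some cs k hfc]
    have hslice : PySem.List.slice s (some (n : Int)) (some ((n : Int) + (k : Int))) =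
        cs.take k := by
      rw [PySem.List.slice_natCast_add, hcs]
    have hdrop : cs.drop k = s.drop (n + k) := by
      rw [hcs, List.drop_drop, Nat.add_comm]
    have hcast : ((n + k : Nat) : Int) = (n : Int) + (k : Int) := by push_cast; ring
    have hstep := ih (cs.drop k).length
      (by simp [List.length_drop]; omega) (n + k) (cs.drop k) (count + 1)
      (subs ++ [String.ofList (cs.take k)]) hdrop rfl
    rw [hcast] at hstep
    simp only [hslice, hstep]
    refine Prod.ext ?_ ?_
    · simp; ring
    · simp [List.append_assoc]

-- ===== VERDICT =====
theorem balancedStringSplitWithTracking_spec : Claim_equal_balancedStringSplitWithTracking := by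
  intro s _
  unfold Spec_balancedStringSplitWithTracking balancedStringSplitWithTracking balancedStringSplitWithTracking_alt
  have := pvGoA_peel 0 s.toList s.toList 0 [] (by simp)
  simpa using this
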